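-- pv_equiv track=rewrite | github.com/PeterShanxin/FYP-fewshotlearn | scripts/visualize_identity_benchmark.py | describe_monotonic_trend
-- ===== SOURCE A (Python) =====
-- from typing import Dict, List, Tuple
--
-- def describe_monotonic_trend(values: List[int]) -> str:
--     """Describe the monotonic trend of a sequence as a short word."""
--     if not values or len(values) < 2:
--         return "stable"
--     diffs = [values[i + 1] - values[i] for i in range(len(values) - 1)]
--     pos = any(d > 0 for d in diffs)
--     neg = any(d < 0 for d in diffs)
--     if pos and not neg:
--         return "increases"
--     if neg and not pos:
--         return "decreases"
--     if not pos and not neg: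
--         return "stable"
--     return "varies"
-- ===== SOURCE B (Python) =====
-- def describe_monotonic_trend(values):
--     """Describe the monotonic trend of a sequence as a short word."""
--     asc = values == sorted(values)
--     desc = values == sorted(values, reverse=True)
--     if asc and desc:
--         return "stable"
--     if asc:
--         return "increases"
--     if desc:
--         return "decreases"
--     return "varies"
-- ===== Notes on version B (the rewrite author's own statement) =====
-- stated objective: idiomatic
-- what changed: Replaces the diffs list and any(d>0)/any(d<0) sign scans with comparisons of the list against sorted(values) and sorted(values, reverse=True); both-sorted means stable, neither means varies, and the empty/singleton guard disappears since such lists are trivially sorted both ways.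
import Mathlib
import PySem

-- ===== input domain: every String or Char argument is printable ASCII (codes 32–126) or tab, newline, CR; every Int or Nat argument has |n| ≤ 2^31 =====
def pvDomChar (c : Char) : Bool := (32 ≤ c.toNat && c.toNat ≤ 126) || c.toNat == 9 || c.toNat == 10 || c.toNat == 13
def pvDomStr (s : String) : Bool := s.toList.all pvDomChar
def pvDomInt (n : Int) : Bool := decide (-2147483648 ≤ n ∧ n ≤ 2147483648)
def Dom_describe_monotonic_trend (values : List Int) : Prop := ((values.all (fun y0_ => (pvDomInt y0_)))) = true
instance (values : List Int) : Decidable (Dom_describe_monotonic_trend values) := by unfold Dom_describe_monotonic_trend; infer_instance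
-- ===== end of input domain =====

-- B compares the list with its sorted copies instead of scanning diff signs (idiomatic; not claimed faster).

-- ===== PORT A =====
def describe_monotonic_trend (values : List Int) : String :=
  if values = [] ∨ values.length < 2 then "stable" else
  let diffs := (PySem.List.pyRange 0 ((values.length : Int) - 1) 1).map
      (fun i => PySem.List.pyGetD values (i + 1) 0 - PySem.List.pyGetD values i 0)
  let pos := diffs.any (fun d => decide (d > 0))
  let neg := diffs.any (fun d => decide (d < 0))
  if pos && !neg then "increases"
  else if neg && !pos then "decreases"
  else if !pos && !neg then "stable"
  else "varies"

-- ===== PORT B =====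
def describe_monotonic_trend_alt (values : List Int) : String :=
  let asc := values == PySem.List.sorted values (fun x => x) false
  let desc := values == PySem.List.sorted values (fun x => x) true
  if asc && desc then "stable"
  else if asc then "increases"
  else if desc then "decreases"
  else "varies"

-- ===== PRECONDITION & SPEC =====
def Spec_describe_monotonic_trend (values : List Int) (out : String) : Prop := out = describe_monotonic_trend_alt values
instance (values : List Int) (out : String) : Decidable (Spec_describe_monotonic_trend values out) := by unfold Spec_describe_monotonic_trend; infer_instance

-- ===== CLAIM (what is proved, stated in full; the proofs are below) =====
def Claim_equal_describe_monotonic_trend : Prop := ∀ (values : List Int), Dom_describe_monotonic_trend values → Spec_describe_monotonic_trend values (describe_monotonic_trend values)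

-- ===== LEMMAS AND PROOFS =====

-- A's `neg` flag is false exactly when the list is nondecreasing.
theorem pv_neg_false_iff (values : List Int) :
    (((PySem.List.pyRange 0 ((values.length : Int) - 1) 1).map
        (fun i => PySem.List.pyGetD values (i + 1) 0 - PySem.List.pyGetD values i 0)).any
      (fun d => decide (d < 0)) = false)
      ↔ values.Pairwise (fun a b => a ≤ b) := by
  rw [← List.isChain_iff_pairwise, List.isChain_iff_getElem]
  simp only [List.any_eq_false, List.mem_map, PySem.List.mem_pyRange_one, decide_eq_true_eq,
    not_lt, forall_exists_index, and_imp]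
  constructor
  · intro h k hk
    have h0 : (0 : Int) ≤ (k : Int) := by positivity
    have h1 : (k : Int) < (values.length : Int) - 1 := by omega
    have := h _ (k : Int) h0 h1 rfl
    rw [PySem.List.pyGetD_eq_getElem values (i := (k : Int) + 1) 0 (by omega) (by omega),
        PySem.List.pyGetD_eq_getElem values (i := (k : Int)) 0 h0 (by omega)] at this
    simp only [Int.toNat_natCast] at this
    have hcast : ((k : Int) + 1).toNat = k + 1 := by omega
    simp only [hcast] at this
    omega
  · intro h d i h0 h1 hd
    subst hd
    have hk : i.toNat + 1 < values.length := by omega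
    have := h i.toNat (by omega)
    rw [PySem.List.pyGetD_eq_getElem values (i := i + 1) 0 (by omega) (by omega),
        PySem.List.pyGetD_eq_getElem values (i := i) 0 h0 (by omega)]
    have hcast : (i + 1).toNat = i.toNat + 1 := by omega
    simp only [hcast]
    omega

-- A's `pos` flag is false exactly when the list is nonincreasing.
theorem pv_pos_false_iff (values : List Int) :
    (((PySem.List.pyRange 0 ((values.length : Int) - 1) 1).map
        (fun i => PySem.List.pyGetD values (i + 1) 0 - PySem.List.pyGetD values i 0)).any
      (fun d => decide (d > 0)) = false)
      ↔ values.Pairwise (fun a b => b ≤ a) := by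
  rw [← List.isChain_iff_pairwise, List.isChain_iff_getElem]
  simp only [List.any_eq_false, List.mem_map, PySem.List.mem_pyRange_one, decide_eq_true_eq,
    not_lt, forall_exists_index, and_imp, gt_iff_lt]
  constructor
  · intro h k hk
    have h0 : (0 : Int) ≤ (k : Int) := by positivity
    have h1 : (k : Int) < (values.length : Int) - 1 := by omega
    have := h _ (k : Int) h0 h1 rfl
    rw [PySem.List.pyGetD_eq_getElem values (i := (k : Int) + 1) 0 (by omega) (by omega),
        PySem.List.pyGetD_eq_getElem values (i := (k : Int)) 0 h0 (by omega)] at this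
    simp only [Int.toNat_natCast] at this
    have hcast : ((k : Int) + 1).toNat = k + 1 := by omega
    simp only [hcast] at this
    omega
  · intro h d i h0 h1 hd
    subst hd
    have hk : i.toNat + 1 < values.length := by omega
    have := h i.toNat (by omega)
    rw [PySem.List.pyGetD_eq_getElem values (i := i + 1) 0 (by omega) (by omega),
        PySem.List.pyGetD_eq_getElem values (i := i) 0 h0 (by omega)]
    have hcast : (i + 1).toNat = i.toNat + 1 := by omega
    simp only [hcast]
    omega

-- B's `asc` flag holds exactly when the list is nondecreasing.
theorem pv_asc_iff (values : List Int) :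
    (values == PySem.List.sorted values (fun x => x) false) = true
      ↔ values.Pairwise (fun a b => a ≤ b) := by
  rw [beq_iff_eq]
  constructor
  · intro h
    have := PySem.List.sorted_pairwise values (fun x => x)
    rw [← h] at this
    exact this
  · intro h
    exact (PySem.List.sorted_eq_self_of_pairwise values (fun x => x) h).symm

-- B's `desc` flag holds exactly when the list is nonincreasing.
theorem pv_desc_iff (values : List Int) :
    (values == PySem.List.sorted values (fun x => x) true) = true
      ↔ values.Pairwise (fun a b => b ≤ a) := by
  rw [beq_iff_eq]
  constructor
  · intro h
    have := PySem.List.sorted_pairwise_rev values (fun x => x)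
    rw [← h] at this
    exact this
  · intro h
    exact (PySem.List.sorted_rev_eq_self_of_pairwise values (fun x => x) h).symm

-- ===== VERDICT (by name: the statement is the Claim_ definition above) =====
theorem describe_monotonic_trend_spec : Claim_equal_describe_monotonic_trend := by
  intro values _
  unfold Spec_describe_monotonic_trend describe_monotonic_trend describe_monotonic_trend_alt
  by_cases hshort : values = [] ∨ values.length < 2
  · -- short lists: B has no guard but both sorted comparisons succeed
    rw [if_pos hshort]
    have hp : values.Pairwise (fun a b : Int => a ≤ b) := by
      match values, hshort with
      | [], _ => exact List.Pairwise.nil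
      | [x], _ => simp
      | (x :: y :: t), h => simp at h
    have hq : values.Pairwise (fun a b : Int => b ≤ a) := by
      match values, hshort with
      | [], _ => exact List.Pairwise.nil
      | [x], _ => simp
      | (x :: y :: t), h => simp at h
    have ha := (pv_asc_iff values).mpr hp
    have hd := (pv_desc_iff values).mpr hq
    simp only [ha, hd, Bool.and_self, if_pos]
  · rw [if_neg hshort]
    simp only
    rcases hpos : ((PySem.List.pyRange 0 ((values.length : Int) - 1) 1).map
        (fun i => PySem.List.pyGetD values (i + 1) 0 - PySem.List.pyGetD values i 0)).any
      (fun d => decide (d > 0)) with _ | _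
      <;> rcases hneg : ((PySem.List.pyRange 0 ((values.length : Int) - 1) 1).map
        (fun i => PySem.List.pyGetD values (i + 1) 0 - PySem.List.pyGetD values i 0)).any
      (fun d => decide (d < 0)) with _ | _
    · -- no increase, no decrease: constant list
      have ha := (pv_asc_iff values).mpr ((pv_neg_false_iff values).mp hneg)
      have hd := (pv_desc_iff values).mpr ((pv_pos_false_iff values).mp hpos)
      simp [ha, hd]
    · -- decrease only
      have hd := (pv_desc_iff values).mpr ((pv_pos_false_iff values).mp hpos)
      have ha : (values == PySem.List.sorted values (fun x => x) false) = false := by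
        rw [Bool.eq_false_iff]
        intro hcon
        rw [(pv_neg_false_iff values).mpr ((pv_asc_iff values).mp hcon)] at hneg
        exact Bool.false_ne_true hneg
      simp [ha, hd]
    · -- increase only
      have ha := (pv_asc_iff values).mpr ((pv_neg_false_iff values).mp hneg)
      have hd : (values == PySem.List.sorted values (fun x => x) true) = false := by
        rw [Bool.eq_false_iff]
        intro hcon
        rw [(pv_pos_false_iff values).mpr ((pv_desc_iff values).mp hcon)] at hpos
        exact Bool.false_ne_true hpos
      simp [ha, hd]
    · -- both: varies
      have ha : (values == PySem.List.sorted values (fun x => x) false) = false := by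
        rw [Bool.eq_false_iff]
        intro hcon
        rw [(pv_neg_false_iff values).mpr ((pv_asc_iff values).mp hcon)] at hneg
        exact Bool.false_ne_true hneg
      have hd : (values == PySem.List.sorted values (fun x => x) true) = false := by
        rw [Bool.eq_false_iff]
        intro hcon
        rw [(pv_pos_false_iff values).mpr ((pv_desc_iff values).mp hcon)] at hpos
        exact Bool.false_ne_true hpos
      simp [ha, hd]
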